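-- pv_equiv track=rewrite | github.com/najicham/nba-stats-scraper | .pre-commit-hooks/validate_model_references.py | is_in_module_docstring
-- ===== SOURCE A (Python) =====
-- def find_module_docstring_end(lines: list) -> int:
--     """Find the line index where the module-level docstring ends.
--
--     Only identifies the FIRST triple-quoted block in the file (the true module
--     docstring). Returns -1 if no module docstring is found. All other
--     triple-quoted strings (SQL queries, class/method docstrings) are NOT
--     treated as docstrings for the purpose of this hook.
--     """
--     # Skip leading blank lines and comments to find the module docstring
--     first_code_line = 0
--     for i, line in enumerate(lines):
--         stripped = line.strip()
--         if stripped and not stripped.startswith('#'):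
--             first_code_line = i
--             break
--
--     # Check if the first non-comment line starts a docstring
--     first_stripped = lines[first_code_line].strip() if first_code_line < len(lines) else ''
--     if not (first_stripped.startswith('"""') or first_stripped.startswith("'''")):
--         return -1  # No module docstring
--
--     quote_char = '"""' if first_stripped.startswith('"""') else "'''"
--
--     # Single-line docstring: """text"""
--     if first_stripped.count(quote_char) >= 2:
--         return first_code_line
--
--     # Multi-line: find closing triple-quote
--     for i in range(first_code_line + 1, len(lines)):
--         if quote_char in lines[i]:
--             return i
--
--     return len(lines) - 1  # Unclosed docstring — treat rest as docstring
--
-- def is_in_module_docstring(lines: list, line_idx: int) -> bool: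
--     """Check if a line is inside the module-level docstring only.
--
--     Unlike the previous is_in_docstring(), this does NOT skip SQL queries
--     or class/method docstrings — only the file's very first triple-quoted block.
--     """
--     end = find_module_docstring_end(lines)
--     if end == -1:
--         return False
--     # Find the start (first non-blank, non-comment line)
--     start = 0
--     for i, line in enumerate(lines):
--         stripped = line.strip()
--         if stripped and not stripped.startswith('#'):
--             start = i
--             break
--     return start <= line_idx <= end
-- ===== SOURCE B (Python) =====
-- def is_in_module_docstring(lines: list, line_idx: int) -> bool:
--     # Single-pass state machine: decide membership online, never materializing
--     # the (start, end) interval of the docstring.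
--     quote = None
--     for i, line in enumerate(lines):
--         if quote is None:
--             s = line.strip()
--             if not s or s.startswith('#'):
--                 continue
--             if s.startswith('"""'):
--                 quote = '"""'
--             elif s.startswith("'''"):
--                 quote = "'''"
--             else:
--                 return False
--             if s.count(quote) >= 2:
--                 return line_idx == i
--             if line_idx < i:
--                 return False
--         elif quote in line:
--             return line_idx <= i
--     if quote is None:
--         return False
--     return line_idx <= len(lines) - 1
-- ===== Notes on version B (the rewrite author's own statement) =====
-- stated objective: alternative
-- what changed: B is a single-pass online state machine that decides membership of line_idx as it streams the lines (returning as soon as the answer is determined), instead of A's strategy of computing the docstring end via a helper, re-scanning for the start, and then range-checking the index.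
import Mathlib
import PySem

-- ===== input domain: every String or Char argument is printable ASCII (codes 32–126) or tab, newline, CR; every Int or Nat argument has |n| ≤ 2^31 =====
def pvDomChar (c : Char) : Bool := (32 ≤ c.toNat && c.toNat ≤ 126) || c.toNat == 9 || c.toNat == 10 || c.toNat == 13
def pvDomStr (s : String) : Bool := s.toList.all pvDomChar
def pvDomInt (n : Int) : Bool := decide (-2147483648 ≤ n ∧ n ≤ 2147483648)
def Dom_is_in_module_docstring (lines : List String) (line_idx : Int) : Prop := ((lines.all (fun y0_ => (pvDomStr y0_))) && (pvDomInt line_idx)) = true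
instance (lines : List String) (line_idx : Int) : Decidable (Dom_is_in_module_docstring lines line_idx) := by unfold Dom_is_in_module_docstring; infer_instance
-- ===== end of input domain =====

-- B replaces A's compute-the-interval-then-test strategy (helper find_module_docstring_end,
-- a second start scan, a range check) by a single-pass online state machine that decides
-- membership of line_idx while streaming the lines (objective: alternative).

-- ===== PORT A =====
-- transliteration of the shared Python sub-expressions
-- 'line.strip() and not line.strip().startswith('#')' and 'quote in line'
def pvIsCode (line : String) : Bool :=
  !(PySem.Str.strip line == "") && !(PySem.Str.startswith (PySem.Str.strip line) "#")

def pvHasQuote (q line : String) : Bool := PySem.Str.isIn q line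

-- the 'for i, line in enumerate(lines): ... break' loop (default 0)
def pvFirstCodeA : List String → Nat → Nat
  | [], _ => 0
  | line :: rest, i => if pvIsCode line then i else pvFirstCodeA rest (i + 1)

-- the 'for i in range(first_code_line + 1, len(lines)): if quote_char in lines[i]: return i' loop
def pvScanCloseA (q : String) : List String → Nat → Option Nat
  | [], _ => none
  | line :: rest, i => if pvHasQuote q line then some i else pvScanCloseA q rest (i + 1)

def find_module_docstring_end (lines : List String) : Int :=
  let first_code_line := pvFirstCodeA lines 0
  let first_stripped :=
    if first_code_line < lines.length then PySem.Str.strip (lines.getD first_code_line "") else ""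
  if !(PySem.Str.startswith first_stripped "\"\"\"" || PySem.Str.startswith first_stripped "'''") then
    -1
  else
    let quote_char := if PySem.Str.startswith first_stripped "\"\"\"" then "\"\"\"" else "'''"
    if 2 ≤ PySem.Str.count first_stripped quote_char then (first_code_line : Int)
    else
      match pvScanCloseA quote_char (lines.drop (first_code_line + 1)) (first_code_line + 1) with
      | some i => (i : Int)
      | none => (lines.length : Int) - 1

def is_in_module_docstring (lines : List String) (line_idx : Int) : Bool :=
  let e := find_module_docstring_end lines
  if e == -1 then false
  else
    let start := pvFirstCodeA lines 0
    decide ((start : Int) ≤ line_idx ∧ line_idx ≤ e)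

-- ===== PORT B =====
-- B's single for-loop: the state 'quote' (None = still seeking the first code line,
-- some q = inside an open docstring delimited by q); i is the current line index.
def pvScanB (line_idx : Int) : Option String → List String → Nat → Bool
  | none, [], _ => false
  | some _, [], i => decide (line_idx ≤ (i : Int) - 1)
  | none, line :: rest, i =>
    let s := PySem.Str.strip line
    if s == "" || PySem.Str.startswith s "#" then pvScanB line_idx none rest (i + 1)
    else
      let q? : Option String :=
        if PySem.Str.startswith s "\"\"\"" then some "\"\"\""
        else if PySem.Str.startswith s "'''" then some "'''" else none
      match q? with
      | none => false
      | some q =>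
        if 2 ≤ PySem.Str.count s q then decide (line_idx = (i : Int))
        else if line_idx < (i : Int) then false
        else pvScanB line_idx (some q) rest (i + 1)
  | some q, line :: rest, i =>
    if pvHasQuote q line then decide (line_idx ≤ (i : Int))
    else pvScanB line_idx (some q) rest (i + 1)

def is_in_module_docstring_alt (lines : List String) (line_idx : Int) : Bool :=
  pvScanB line_idx none lines 0

-- ===== PRECONDITION & SPEC =====
def Spec_is_in_module_docstring (lines : List String) (line_idx : Int) (out : Bool) : Prop := out = is_in_module_docstring_alt lines line_idx
instance (lines : List String) (line_idx : Int) (out : Bool) : Decidable (Spec_is_in_module_docstring lines line_idx out) := by unfold Spec_is_in_module_docstring; infer_instance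

-- ===== CLAIM (what is proved, stated in full; the proofs are below) =====
def Claim_equal_is_in_module_docstring : Prop := ∀ (lines : List String) (line_idx : Int), Dom_is_in_module_docstring lines line_idx → Spec_is_in_module_docstring lines line_idx (is_in_module_docstring lines line_idx)

-- ===== LEMMAS AND PROOFS =====

-- small standalone facts used to rewrite the range checks
theorem pv_dec_lo (s e x : Int) (h : x < s) : decide (s ≤ x ∧ x ≤ e) = false := by
  rw [decide_eq_false_iff_not]; omega

theorem pv_dec_hi (s e x : Int) (h : ¬ x < s) : decide (s ≤ x ∧ x ≤ e) = decide (x ≤ e) := by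
  rw [decide_eq_decide]; constructor
  · intro hx; exact hx.2
  · intro hx; exact ⟨by omega, hx⟩

theorem pv_dec_pt (s x : Int) : decide (s ≤ x ∧ x ≤ s) = decide (x = s) := by
  rw [decide_eq_decide]; constructor
  · intro hx; omega
  · intro hx; omega

theorem pv_cast1 (i j : Nat) : ((i + 1 + j : Nat) : Int) = ((i + (j + 1) : Nat) : Int) := by
  push_cast; ring

theorem pv_cast2 (i n : Nat) : ((i + 1 : Nat) : Int) + ((n : Nat) : Int) - 1 = (i : Int) + ((n + 1 : Nat) : Int) - 1 := by
  push_cast; ring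

theorem pv_droplen (lines : List String) (start : Nat) (h : start < lines.length) :
    ((start + 1 : Nat) : Int) + (((lines.drop (start + 1)).length : Nat) : Int) - 1 = (lines.length : Int) - 1 := by
  rw [List.length_drop]; push_cast; omega

theorem pvFirstCodeA_eq (ls : List String) (i : Nat) :
    pvFirstCodeA ls i =
      match ls.findIdx? pvIsCode with
      | some j => i + j
      | none => 0 := by
  induction ls generalizing i with
  | nil => rfl
  | cons l rest ih =>
    simp only [pvFirstCodeA, List.findIdx?_cons]
    by_cases h : pvIsCode l = true
    · rw [if_pos h, if_pos h]; rfl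
    · rw [if_neg h, if_neg h, ih]
      cases hfi : rest.findIdx? pvIsCode with
      | none => rfl
      | some j => show i + 1 + j = i + (j + 1); omega

theorem pvScanCloseA_eq (q : String) (ls : List String) (i : Nat) :
    pvScanCloseA q ls i =
      (ls.findIdx? (pvHasQuote q)).map (fun j => i + j) := by
  induction ls generalizing i with
  | nil => rfl
  | cons l rest ih =>
    simp only [pvScanCloseA, List.findIdx?_cons]
    by_cases h : pvHasQuote q l = true
    · rw [if_pos h, if_pos h]; rfl
    · rw [if_neg h, if_neg h, ih]
      cases hfi : rest.findIdx? (pvHasQuote q) with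
      | none => rfl
      | some j => simp only [Option.map_some, Option.some_inj]; omega

theorem findIdx?_some_lt {α : Type} {p : α → Bool} {ls : List α} {j : Nat}
    (h : ls.findIdx? p = some j) : j < ls.length := by
  induction ls generalizing j with
  | nil => simp at h
  | cons x xs ih =>
    rw [List.findIdx?_cons] at h
    by_cases hx : p x = true
    · simp [hx] at h; simp only [List.length_cons]; omega
    · simp only [hx, Bool.false_eq_true, if_false, Option.map_eq_some_iff] at h
      obtain ⟨j', hj', rfl⟩ := h
      have := ih hj'
      simp only [List.length_cons]; omega

-- a line whose stripped form is empty or starts with '#' starts with neither triple quote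
theorem not_code_not_quote (l : String) (h : pvIsCode l = false) :
    PySem.Str.startswith (PySem.Str.strip l) "\"\"\"" = false ∧
    PySem.Str.startswith (PySem.Str.strip l) "'''" = false := by
  unfold pvIsCode at h
  simp only [Bool.and_eq_false_iff, Bool.not_eq_false'] at h
  rcases h with h | h
  · rw [beq_iff_eq] at h
    rw [h]
    constructor <;> rfl
  · rw [PySem.Str.startswith_eq] at h
    rw [PySem.Str.startswith_eq, PySem.Str.startswith_eq]
    rw [PySem.Chars.startswith_iff] at h
    obtain ⟨t, ht⟩ := h
    constructor <;>
    · rw [← Bool.not_eq_true, PySem.Chars.startswith_iff]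
      rintro ⟨t', ht'⟩
      rw [← ht] at ht'
      simp at ht'

-- B's closed-docstring mode computes 'line_idx <= end' for A's end
theorem pvScanB_some_eq (line_idx : Int) (q : String) (ls : List String) (i : Nat) :
    pvScanB line_idx (some q) ls i =
      decide (line_idx ≤
        (match ls.findIdx? (pvHasQuote q) with
         | some j => ((i + j : Nat) : Int)
         | none => (i : Int) + ls.length - 1)) := by
  induction ls generalizing i with
  | nil => simp [pvScanB]
  | cons l rest ih =>
    simp only [pvScanB, List.findIdx?_cons]
    by_cases h : pvHasQuote q l = true
    · simp [h]
    · simp only [h, Bool.false_eq_true, if_false, ih]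
      cases hfi : rest.findIdx? (pvHasQuote q) with
      | none =>
        simp only [Option.map_none, List.length_cons]
        rw [pv_cast2]
        rfl
      | some j =>
        simp only [Option.map_some]
        simp only [pv_cast1]
        rfl

-- B's seeking mode, characterized through findIdx? (what A's first scan computes)
theorem pvScanB_none_eq (line_idx : Int) (ls : List String) (i : Nat) :
    pvScanB line_idx none ls i =
      match ls.findIdx? pvIsCode with
      | none => false
      | some k =>
        let s := PySem.Str.strip (ls.getD k "")
        let q? : Option String :=
          if PySem.Str.startswith s "\"\"\"" then some "\"\"\""
          else if PySem.Str.startswith s "'''" then some "'''" else none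
        match q? with
        | none => false
        | some q =>
          if 2 ≤ PySem.Str.count s q then decide (line_idx = ((i + k : Nat) : Int))
          else if line_idx < ((i + k : Nat) : Int) then false
          else pvScanB line_idx (some q) (ls.drop (k + 1)) (i + k + 1) := by
  induction ls generalizing i with
  | nil => rfl
  | cons l rest ih =>
    simp only [pvScanB, List.findIdx?_cons]
    by_cases h : pvIsCode l = true
    · have hnot : (PySem.Str.strip l == "" || PySem.Str.startswith (PySem.Str.strip l) "#") = false := by
        unfold pvIsCode at h
        simp only [Bool.and_eq_true, Bool.not_eq_eq_eq_not, Bool.not_true] at h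
        simp only [h.1, h.2, Bool.or_self]
      rw [hnot]
      simp only [h, if_true, Bool.false_eq_true, if_false]
      rfl
    · have hnot : (PySem.Str.strip l == "" || PySem.Str.startswith (PySem.Str.strip l) "#") = true := by
        rw [Bool.not_eq_true] at h
        unfold pvIsCode at h
        simp only [Bool.and_eq_false_iff, Bool.not_eq_false'] at h
        rcases h with h | h
        · simp only [h, Bool.true_or]
        · simp only [h, Bool.or_true]
      rw [hnot]
      simp only [h, Bool.false_eq_true, if_false, if_true, ih]
      cases hfi : rest.findIdx? pvIsCode with
      | none => rfl
      | some k =>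
        simp only [Option.map_some]
        have e1 : (l :: rest).getD (k + 1) "" = rest.getD k "" := rfl
        have e2 : (l :: rest).drop (k + 1 + 1) = rest.drop (k + 1) := rfl
        have e4 : i + 1 + k + 1 = i + (k + 1) + 1 := by omega
        rw [e1, e2, pv_cast1, e4]

-- ===== VERDICT (by name: the statement is the Claim_ definition above) =====
theorem is_in_module_docstring_spec : Claim_equal_is_in_module_docstring := by
  intro lines line_idx _
  unfold Spec_is_in_module_docstring is_in_module_docstring is_in_module_docstring_alt
      find_module_docstring_end
  rw [pvFirstCodeA_eq, pvScanB_none_eq]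
  cases hfi : lines.findIdx? pvIsCode with
  | none =>
    cases lines with
    | nil => rfl
    | cons l rest =>
      have hl : pvIsCode l = false := by
        have := List.findIdx?_eq_none_iff.mp hfi l (by simp)
        simpa using this
      have hq := not_code_not_quote l hl
      simp at hq
      simp [hq.1, hq.2]
  | some start =>
    have hlt : start < lines.length := findIdx?_some_lt hfi
    simp only [Nat.zero_add, hlt, if_true]
    by_cases h1 : PySem.Str.startswith (PySem.Str.strip (lines.getD start "")) "\"\"\"" = true
    case pos =>
      simp only [h1, if_true, Bool.true_or, Bool.not_true, Bool.false_eq_true, if_false]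
      by_cases hc : 2 ≤ PySem.Str.count (PySem.Str.strip (lines.getD start "")) "\"\"\""
      case pos =>
        have hne : (((start : Int)) == -1) = false := by rw [beq_eq_false_iff_ne]; omega
        simp only [hc, if_true, hne, Bool.false_eq_true, if_false]
        rw [pv_dec_pt]
      case neg =>
        rw [pvScanCloseA_eq, pvScanB_some_eq]
        simp only [hc, if_false]
        cases hsc : (lines.drop (start + 1)).findIdx? (pvHasQuote "\"\"\"") with
        | some j =>
          have hne : (((start + 1 + j : Nat) : Int) == -1) = false := by
            rw [beq_eq_false_iff_ne]
            have h0 : (0 : Int) ≤ ((start + 1 + j : Nat) : Int) := Int.natCast_nonneg _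
            omega
          simp only [Option.map_some, hne, Bool.false_eq_true, if_false]
          by_cases hlo : line_idx < ((start : Nat) : Int)
          · rw [if_pos hlo]
            exact (pv_dec_lo _ _ _ hlo)
          · rw [if_neg hlo]
            exact (pv_dec_hi _ _ _ hlo)
        | none =>
          have hne : (((lines.length : Int) - 1) == -1) = false := by
            rw [beq_eq_false_iff_ne]
            have h0 : (0 : Int) < (lines.length : Int) := by exact_mod_cast Nat.lt_of_le_of_lt (Nat.zero_le _) hlt
            omega
          simp only [Option.map_none, hne, Bool.false_eq_true, if_false]
          rw [pv_droplen lines start hlt]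
          by_cases hlo : line_idx < ((start : Nat) : Int)
          · rw [if_pos hlo]
            exact (pv_dec_lo _ _ _ hlo)
          · rw [if_neg hlo]
            exact (pv_dec_hi _ _ _ hlo)
    case neg =>
      rw [Bool.not_eq_true] at h1
      by_cases h2 : PySem.Str.startswith (PySem.Str.strip (lines.getD start "")) "'''" = true
      case pos =>
        simp only [h1, h2, if_true, Bool.false_eq_true, if_false, Bool.false_or,
          Bool.not_true]
        by_cases hc : 2 ≤ PySem.Str.count (PySem.Str.strip (lines.getD start "")) "'''"
        case pos =>
          have hne : (((start : Int)) == -1) = false := by rw [beq_eq_false_iff_ne]; omega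
          simp only [hc, if_true, hne, Bool.false_eq_true, if_false]
          rw [pv_dec_pt]
        case neg =>
          rw [pvScanCloseA_eq, pvScanB_some_eq]
          simp only [hc, if_false]
          cases hsc : (lines.drop (start + 1)).findIdx? (pvHasQuote "'''") with
          | some j =>
            have hne : (((start + 1 + j : Nat) : Int) == -1) = false := by
              rw [beq_eq_false_iff_ne]
              have h0 : (0 : Int) ≤ ((start + 1 + j : Nat) : Int) := Int.natCast_nonneg _
              omega
            simp only [Option.map_some, hne, Bool.false_eq_true, if_false]
            by_cases hlo : line_idx < ((start : Nat) : Int)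
            · rw [if_pos hlo]
              exact (pv_dec_lo _ _ _ hlo)
            · rw [if_neg hlo]
              exact (pv_dec_hi _ _ _ hlo)
          | none =>
            have hne : (((lines.length : Int) - 1) == -1) = false := by
              rw [beq_eq_false_iff_ne]
              have h0 : (0 : Int) < (lines.length : Int) := by exact_mod_cast Nat.lt_of_le_of_lt (Nat.zero_le _) hlt
              omega
            simp only [Option.map_none, hne, Bool.false_eq_true, if_false]
            rw [pv_droplen lines start hlt]
            by_cases hlo : line_idx < ((start : Nat) : Int)
            · rw [if_pos hlo]
              exact (pv_dec_lo _ _ _ hlo)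
            · rw [if_neg hlo]
              exact (pv_dec_hi _ _ _ hlo)
      case neg =>
        rw [Bool.not_eq_true] at h2
        simp only [h1, h2, Bool.or_self, Bool.not_false, if_true,
          Bool.false_eq_true, if_false, beq_self_eq_true]
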